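-- pv_equiv track=rewrite | github.com/F0d0s/PVA | ULOHY/ULOHA4/main.py | find_equal_sums_intervals
-- ===== SOURCE A (Python) =====
-- def find_equal_sums_intervals(sequence):
--     if not sequence or len(sequence) > 2000:
--         raise ValueError("Nespravny vstup.")
--
--     intervals = []
--     equal_sums_count = 0
--
--     for i in range(len(sequence)):
--         for j in range(i + 1, len(sequence) + 1):
--             interval = sequence[i:j]
--             if len(interval) >= 2:
--                 interval_sum = sum(interval)
--                 intervals.append((i, j - 1, interval_sum))
--
--     for i in range(len(intervals)):
--         for j in range(i + 1, len(intervals)):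
--             if intervals[i][2] == intervals[j][2]:
--                 equal_sums_count += 1
--
--     return equal_sums_count
-- ===== SOURCE B (Python) =====
-- def find_equal_sums_intervals(sequence):
--     if not sequence or len(sequence) > 2000:
--         raise ValueError("Nespravny vstup.")
--
--     n = len(sequence)
--     prefix = [0]
--     for x in sequence:
--         prefix.append(prefix[-1] + x)
--
--     counts = {}
--     for i in range(n):
--         for j in range(i + 2, n + 1):
--             s = prefix[j] - prefix[i]
--             counts[s] = counts.get(s, 0) + 1
--
--     total = 0
--     for c in counts.values():
--         total += c * (c - 1) // 2
--     return total
-- ===== Notes on version B (the rewrite author's own statement) =====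
-- stated objective: faster
-- what changed: Replaces A's O(n^2)-sized interval list plus all-pairs comparison with prefix sums, a hash-map counter of interval sums, and the closed form c*(c-1)//2 per distinct sum.
import Mathlib
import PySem

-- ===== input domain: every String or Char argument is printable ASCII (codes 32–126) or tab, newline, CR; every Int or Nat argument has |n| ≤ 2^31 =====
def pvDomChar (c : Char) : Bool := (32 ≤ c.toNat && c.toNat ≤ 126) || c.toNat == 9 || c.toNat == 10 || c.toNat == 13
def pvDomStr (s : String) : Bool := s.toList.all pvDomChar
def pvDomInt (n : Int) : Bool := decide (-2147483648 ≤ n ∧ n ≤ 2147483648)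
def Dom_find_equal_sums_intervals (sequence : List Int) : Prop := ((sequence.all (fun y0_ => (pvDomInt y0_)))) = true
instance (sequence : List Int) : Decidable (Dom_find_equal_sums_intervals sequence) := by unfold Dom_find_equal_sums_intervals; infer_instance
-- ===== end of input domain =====

-- B replaces A's O(n^2)-sized interval list and all-pairs comparison by prefix sums, a
-- counter keyed by interval sum, and the closed form c*(c-1)//2 per distinct sum (faster).


-- ===== PORT A =====
def find_equal_sums_intervals (sequence : List Int) : Int :=
  -- 'if not sequence or len(sequence) > 2000: raise ValueError' — excluded by Pre_; value here irrelevant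
  if sequence = [] ∨ 2000 < (PySem.List.len sequence) then 0
  else
    let intervals : List (Int × Int × Int) :=
      (PySem.List.pyRange 0 (PySem.List.len sequence) 1).foldl (fun acc i =>
        (PySem.List.pyRange (i + 1) (PySem.List.len sequence + 1) 1).foldl (fun acc j =>
          let interval := PySem.List.slice sequence (some i) (some j)
          if 2 ≤ (PySem.List.len interval) then
            acc ++ [(i, j - 1, interval.sum)]
          else acc) acc) []
    (PySem.List.pyRange 0 (PySem.List.len intervals) 1).foldl (fun cnt i =>
      (PySem.List.pyRange (i + 1) (PySem.List.len intervals) 1).foldl (fun cnt j =>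
        if (PySem.List.pyGetD intervals i (0, 0, 0)).2.2 = (PySem.List.pyGetD intervals j (0, 0, 0)).2.2
        then cnt + 1 else cnt) cnt) 0

-- ===== PORT B =====
def find_equal_sums_intervals_alt (sequence : List Int) : Int :=
  if sequence = [] ∨ 2000 < (PySem.List.len sequence) then 0
  else
    let n := PySem.List.len sequence
    let pfx := sequence.foldl (fun p x => p ++ [PySem.List.pyGetD p (-1) 0 + x]) [(0 : Int)]
    let counts :=
      (PySem.List.pyRange 0 n 1).foldl (fun c i =>
        (PySem.List.pyRange (i + 2) (n + 1) 1).foldl (fun c j =>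
          let s := PySem.List.pyGetD pfx j 0 - PySem.List.pyGetD pfx i 0
          c.insert s (c.getD s 0 + 1)) c) (PySem.Dict.empty (κ := Int) (ν := Int))
    counts.values.foldl (fun total c => total + PySem.Int.floordiv (c * (c - 1)) 2) 0

-- ===== PRECONDITION & SPEC =====
-- Pre_ excludes exactly the inputs on which A raises ValueError: the empty list and lists longer than 2000.
def Pre_find_equal_sums_intervals (sequence : List Int) : Prop :=
  sequence ≠ [] ∧ (sequence.length : Int) ≤ 2000
instance (sequence : List Int) : Decidable (Pre_find_equal_sums_intervals sequence) := by
  unfold Pre_find_equal_sums_intervals; infer_instance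
def pvWitness_find_equal_sums_intervals : List Int := [1, 2, 3]

def Spec_find_equal_sums_intervals (sequence : List Int) (out : Int) : Prop := out = find_equal_sums_intervals_alt sequence
instance (sequence : List Int) (out : Int) : Decidable (Spec_find_equal_sums_intervals sequence out) := by unfold Spec_find_equal_sums_intervals; infer_instance

-- ===== CLAIM (what is proved, stated in full; the proofs are below) =====
def Claim_equal_find_equal_sums_intervals : Prop := ∀ (sequence : List Int), Dom_find_equal_sums_intervals sequence → Pre_find_equal_sums_intervals sequence → Spec_find_equal_sums_intervals sequence (find_equal_sums_intervals sequence)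

-- ===== LEMMAS AND PROOFS =====

def pairAux : List Int → Int
  | [] => 0
  | x :: t => (t.count x : Int) + pairAux t

theorem pairAux_append_singleton (S : List Int) (x : Int) :
    pairAux (S ++ [x]) = pairAux S + (S.count x : Int) := by
  induction S with
  | nil => simp [pairAux]
  | cons y S ih =>
      simp only [List.cons_append, pairAux, ih, List.count_append, List.count_cons, List.count_nil]
      by_cases h : x = y
      · subst h; simp; ring
      · simp [h, Ne.symm h]; ring

theorem sum_map_update (K : List Int) (x : Int) (f g : Int → Int)
    (hnd : K.Nodup) (hx : x ∈ K) (hne : ∀ v ∈ K, v ≠ x → g v = f v) :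
    (K.map g).sum = (K.map f).sum + (g x - f x) := by
  induction K with
  | nil => simp at hx
  | cons y K ih =>
      rcases List.mem_cons.mp hx with h | h
      · subst h
        have : ∀ v ∈ K, g v = f v := by
          intro v hv
          exact hne v (List.mem_cons_of_mem _ hv) (fun hvy => (List.nodup_cons.mp hnd).1 (hvy ▸ hv))
        simp only [List.map_cons, List.sum_cons]
        rw [List.map_congr_left this]
        ring
      · have hy : y ≠ x := fun hyx => (List.nodup_cons.mp hnd).1 (hyx ▸ h)
        simp only [List.map_cons, List.sum_cons]
        rw [ih (List.nodup_cons.mp hnd).2 h (fun v hv => hne v (List.mem_cons_of_mem _ hv)),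
            hne y (List.mem_cons_self) hy]
        ring

theorem floordiv_step (c : Int) :
    PySem.Int.floordiv ((c + 1) * c) 2 = PySem.Int.floordiv (c * (c - 1)) 2 + c := by
  rw [PySem.Int.floordiv_eq_ediv_of_pos (by norm_num), PySem.Int.floordiv_eq_ediv_of_pos (by norm_num)]
  obtain ⟨k, hk⟩ := Int.even_mul_succ_self (c - 1)
  have h1 : c * (c - 1) = 2 * k := by linear_combination hk
  have h2 : (c + 1) * c = 2 * (k + c) := by linear_combination hk
  rw [h1, h2, Int.mul_ediv_cancel_left _ (by norm_num), Int.mul_ediv_cancel_left _ (by norm_num)]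

theorem pairAux_eq_counts (S : List Int) :
    pairAux S = ((PySem.Set.ofList S).map (fun k =>
      PySem.Int.floordiv (((S.count k : Int)) * ((S.count k : Int) - 1)) 2)).sum := by
  induction S using List.reverseRecOn with
  | nil => simp [pairAux]
  | append_singleton S x ih =>
      rw [pairAux_append_singleton, ih, PySem.Set.ofList_append_singleton]
      by_cases hx : x ∈ S
      · rw [PySem.Set.add_of_mem (by simpa [PySem.Set.mem_ofList] using hx)]
        have hupd := sum_map_update (PySem.Set.ofList S) x
          (fun k => PySem.Int.floordiv (((S.count k : Int)) * ((S.count k : Int) - 1)) 2)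
          (fun k => PySem.Int.floordiv ((((S ++ [x]).count k : Int)) * (((S ++ [x]).count k : Int) - 1)) 2)
          (PySem.Set.nodup_ofList S)
          (by simpa [PySem.Set.mem_ofList] using hx)
          (by
            intro v hv hvx
            have hcv : (S ++ [x]).count v = S.count v := by
              simp [List.count_append, Ne.symm hvx]
            simp only [hcv])
        rw [hupd]
        have hcx : ((S ++ [x]).count x : Int) = (S.count x : Int) + 1 := by
          simp [List.count_append]
        simp only [hcx]
        rw [show (S.count x : Int) + 1 - 1 = ((S.count x : Int) + 1 - 1) from rfl]
        have : (S.count x : Int) + 1 - 1 = (S.count x : Int) := by ring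
        rw [this, floordiv_step]
        ring
      · have hc0 : S.count x = 0 := List.count_eq_zero.mpr hx
        rw [PySem.Set.add_of_not_mem (by simpa [PySem.Set.mem_ofList] using hx)]
        have hmap : (PySem.Set.ofList S).map (fun k =>
              PySem.Int.floordiv ((((S ++ [x]).count k : Int)) * (((S ++ [x]).count k : Int) - 1)) 2)
            = (PySem.Set.ofList S).map (fun k =>
              PySem.Int.floordiv (((S.count k : Int)) * ((S.count k : Int) - 1)) 2) := by
          apply List.map_congr_left
          intro v hv
          have hvx : v ≠ x := fun h => hx (by simpa [PySem.Set.mem_ofList, h] using hv)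
          have hcv : (S ++ [x]).count v = S.count v := by
            simp [List.count_append, Ne.symm hvx]
          simp only [hcv]
        rw [List.map_append, List.sum_append, hmap]
        have hcx : (S ++ [x]).count x = 1 := by simp [List.count_append, hc0]
        simp [hc0, PySem.Int.floordiv]

theorem prefix_foldl (xs : List Int) : ∀ (p : List Int) (t : Int),
    xs.foldl (fun p x => p ++ [PySem.List.pyGetD p (-1) 0 + x]) (p ++ [t])
      = (p ++ [t]) ++ (List.range xs.length).map (fun k => t + (xs.take (k + 1)).sum) := by
  induction xs with
  | nil => intro p t; simp
  | cons x xs ih =>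
      intro p t
      simp only [List.foldl_cons, PySem.List.pyGetD_neg_one_append_singleton]
      rw [List.append_assoc p [t] [t + x]]
      rw [show ([t] ++ [t + x] : List Int) = [t] ++ [t + x] from rfl]
      rw [← List.append_assoc p [t] [t + x], ih (p ++ [t]) (t + x)]
      simp only [List.length_cons, List.range_succ_eq_map, List.map_cons, List.map_map]
      simp only [List.take_succ_cons, List.sum_cons, List.take_zero, List.sum_nil]
      simp [Function.comp_def, add_assoc]

theorem pfx_eq (sequence : List Int) :
    sequence.foldl (fun p x => p ++ [PySem.List.pyGetD p (-1) 0 + x]) [(0 : Int)]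
      = (List.range (sequence.length + 1)).map (fun k => ((sequence.take k).sum)) := by
  have h := prefix_foldl sequence [] 0
  simp only [List.nil_append] at h
  rw [h, List.range_succ_eq_map]
  simp [Function.comp_def]

theorem sum_take_sub (l : List Int) (a b : Nat) (hab : a ≤ b) :
    (l.take b).sum - (l.take a).sum = ((l.drop a).take (b - a)).sum := by
  rw [show b = a + (b - a) by omega, List.take_add, List.sum_append, Nat.add_sub_cancel_left]
  ring

theorem pfx_getD (sequence : List Int) (j : Int) (h0 : 0 ≤ j) (h1 : j ≤ (sequence.length : Int)) :
    PySem.List.pyGetD ((List.range (sequence.length + 1)).map (fun k => ((sequence.take k).sum))) j 0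
      = (sequence.take j.toNat).sum := by
  rw [PySem.List.pyGetD_eq_getElem _ _ h0 (by simp; omega)]
  simp

theorem nested_foldl_eq {γ : Type} (l : List Int) (g : Int → List Int) (σ : Int → Int → Int)
    (step : γ → Int → γ) (init : γ) :
    l.foldl (fun c i => (g i).foldl (fun c j => step c (σ i j)) c) init
      = (l.flatMap (fun i => (g i).map (σ i))).foldl step init := by
  induction l generalizing init with
  | nil => rfl
  | cons i l ih => simp [List.foldl_map, ih]

def sumsOf (sequence : List Int) : List Int :=
  (PySem.List.pyRange 0 (sequence.length : Int) 1).flatMap (fun i =>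
    (PySem.List.pyRange (i + 2) ((sequence.length : Int) + 1) 1).map (fun j =>
      ((sequence.drop i.toNat).take (j.toNat - i.toNat)).sum))

theorem portB_eq_counts (sequence : List Int) (h : ¬(sequence = [] ∨ 2000 < (PySem.List.len sequence))) :
    find_equal_sums_intervals_alt sequence =
      ((PySem.Set.ofList (sumsOf sequence)).map (fun k =>
        PySem.Int.floordiv ((((sumsOf sequence).count k : Int)) * (((sumsOf sequence).count k : Int) - 1)) 2)).sum := by
  have h' : ¬(sequence = [] ∨ 2000 < (sequence.length : Int)) := by
    simpa [PySem.List.len_eq] using h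
  simp only [find_equal_sums_intervals_alt, PySem.List.len_eq, pfx_eq, if_neg h']
  rw [nested_foldl_eq (γ := PySem.Dict Int Int) _ _
    (fun i j => PySem.List.pyGetD ((List.range (sequence.length + 1)).map (fun k => ((sequence.take k).sum))) j 0
      - PySem.List.pyGetD ((List.range (sequence.length + 1)).map (fun k => ((sequence.take k).sum))) i 0)
    (fun c v => c.insert v (c.getD v 0 + 1))]
  have hlist : (PySem.List.pyRange 0 (sequence.length : Int) 1).flatMap (fun i =>
      (PySem.List.pyRange (i + 2) ((sequence.length : Int) + 1) 1).map (fun j =>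
        PySem.List.pyGetD ((List.range (sequence.length + 1)).map (fun k => ((sequence.take k).sum))) j 0
          - PySem.List.pyGetD ((List.range (sequence.length + 1)).map (fun k => ((sequence.take k).sum))) i 0))
      = sumsOf sequence := by
    apply List.flatMap_congr
    intro i hi
    rw [PySem.List.mem_pyRange_one] at hi
    apply List.map_congr_left
    intro j hj
    rw [PySem.List.mem_pyRange_one] at hj
    rw [pfx_getD sequence j (by omega) (by omega), pfx_getD sequence i hi.1 (by omega)]
    exact sum_take_sub sequence i.toNat j.toNat (by omega)
  rw [hlist, PySem.Dict.foldl_insert_getD_add_one_eq_counter]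
  rw [show ∀ (d : PySem.Dict Int Int), d.values = d.items.map (·.2) from fun _ => rfl]
  rw [PySem.Dict.items_counter, PySem.List.foldl_add, List.map_map]
  simp [Function.comp_def]

theorem idx_sum (M : List Int) :
    ((List.range M.length).map (fun k => ((M.drop (k + 1)).count (M.getD k 0) : Int))).sum
      = pairAux M := by
  induction M with
  | nil => simp [pairAux]
  | cons x t ih =>
      simp only [List.length_cons, List.range_succ_eq_map, List.map_cons, List.map_map, pairAux]
      simp only [List.sum_cons, Function.comp_def, List.getD_cons_succ, List.drop_succ_cons,
        List.getD_cons_zero, List.drop_zero]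
      rw [ih]

theorem countP_range_getD {γ : Type} (L : List γ) (d : γ) (q : γ → Bool) :
    ∀ (k a : Nat), a + k = L.length →
      ((PySem.List.pyRange (a : Int) (L.length : Int) 1).countP (fun j => q (PySem.List.pyGetD L j d)))
        = (L.drop a).countP q := by
  intro k
  induction k with
  | zero =>
      intro a ha
      rw [PySem.List.pyRange_one_eq_nil (by omega), List.drop_eq_nil_of_le (by omega)]
      rfl
  | succ k ih =>
      intro a ha
      have hlt : a < L.length := by omega
      rw [PySem.List.pyRange_one_cons (by exact_mod_cast hlt), List.countP_cons]
      rw [show ((a : Int) + 1) = ((a + 1 : Nat) : Int) by push_cast; ring]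
      rw [ih (a + 1) (by omega)]
      rw [List.drop_eq_getElem_cons hlt, List.countP_cons]
      have : PySem.List.pyGetD L (a : Int) d = L[a] := by
        rw [PySem.List.pyGetD_natCast, List.getD_eq_getElem _ _ hlt]
      rw [this]

theorem phase2 (L : List (Int × Int × Int)) :
    (PySem.List.pyRange 0 (PySem.List.len L) 1).foldl (fun cnt i =>
      (PySem.List.pyRange (i + 1) (PySem.List.len L) 1).foldl (fun cnt j =>
        if (PySem.List.pyGetD L i (0, 0, 0)).2.2 = (PySem.List.pyGetD L j (0, 0, 0)).2.2
        then cnt + 1 else cnt) cnt) 0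
      = pairAux (L.map (fun t => t.2.2)) := by
  simp only [PySem.List.len_eq, PySem.List.foldl_ite_add_one, PySem.List.foldl_add, zero_add]
  rw [PySem.List.pyRange_zero_nat L.length, List.map_map]
  rw [← idx_sum (L.map (fun t => t.2.2))]
  simp only [Function.comp_def, List.length_map]
  congr 1
  apply List.map_congr_left
  intro k hk
  rw [List.mem_range] at hk
  rw [show ((k : Int) + 1) = ((k + 1 : Nat) : Int) by push_cast; ring]
  rw [countP_range_getD L (0, 0, 0)
    (fun y => decide ((PySem.List.pyGetD L (k : Int) (0, 0, 0)).2.2 = y.2.2))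
    (L.length - (k + 1)) (k + 1) (by omega)]
  have hgk : PySem.List.pyGetD L (k : Int) (0, 0, 0) = L[k] := by
    rw [PySem.List.pyGetD_natCast, List.getD_eq_getElem _ _ hk]
  rw [hgk]
  have hM : (L.map (fun t => t.2.2)).getD k 0 = L[k].2.2 := by
    rw [List.getD_eq_getElem _ _ (by simpa using hk)]
    simp
  rw [hM]
  congr 1
  rw [← List.map_drop, List.count_eq_countP, List.countP_map]
  apply List.countP_congr
  intro y hy
  simp only [Function.comp_def, beq_iff_eq, decide_eq_true_eq]
  exact eq_comm

theorem slice_length_eq (sequence : List Int) (i j : Int) (h0 : 0 ≤ i) (hij : i ≤ j)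
    (hj : j ≤ (sequence.length : Int)) :
    ((PySem.List.slice sequence (some i) (some j)).length : Int) = j - i := by
  rw [PySem.List.slice_toNat _ h0 (by omega)]
  simp only [List.length_take, List.length_drop]
  omega

theorem intervals_eq (sequence : List Int) :
    ((PySem.List.pyRange 0 (PySem.List.len sequence) 1).foldl (fun acc i =>
        (PySem.List.pyRange (i + 1) (PySem.List.len sequence + 1) 1).foldl (fun acc j =>
          if 2 ≤ PySem.List.len (PySem.List.slice sequence (some i) (some j)) then
            acc ++ [(i, j - 1, (PySem.List.slice sequence (some i) (some j)).sum)]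
          else acc) acc) ([] : List (Int × Int × Int)))
      = (PySem.List.pyRange 0 ((sequence.length : Int)) 1).flatMap (fun i =>
          (PySem.List.pyRange (i + 2) ((sequence.length : Int) + 1) 1).map (fun j =>
            (i, j - 1, ((sequence.drop i.toNat).take (j.toNat - i.toNat)).sum))) := by
  rw [PySem.List.foldl_congr_mem _ _
    (fun acc i => acc ++ (PySem.List.pyRange (i + 2) ((sequence.length : Int) + 1) 1).map (fun j =>
      (i, j - 1, ((sequence.drop i.toNat).take (j.toNat - i.toNat)).sum))) _
    (by
      intro acc i hi
      rw [PySem.List.len_eq, PySem.List.mem_pyRange_one] at hi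
      rw [PySem.List.foldl_append_ite
        (fun j => 2 ≤ PySem.List.len (PySem.List.slice sequence (some i) (some j)))
        (fun j => (i, j - 1, (PySem.List.slice sequence (some i) (some j)).sum))]
      congr 1
      rw [show (PySem.List.len sequence + 1) = ((sequence.length : Int) + 1) by
        rw [PySem.List.len_eq]]
      rw [PySem.List.pyRange_one_append (i + 1) (i + 2) ((sequence.length : Int) + 1)
        (by omega) (by omega)]
      rw [List.filter_append]
      rw [show (i + 2) = (i + 1) + 1 by ring, PySem.List.pyRange_one_singleton]
      have h1 : (List.filter (fun j =>
          decide (2 ≤ PySem.List.len (PySem.List.slice sequence (some i) (some j)))) [i + 1]) = [] := by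
        simp only [List.filter_cons, List.filter_nil]
        rw [show (decide (2 ≤ PySem.List.len (PySem.List.slice sequence (some i) (some (i + 1))))) = false by
          rw [decide_eq_false_iff_not, PySem.List.len_eq,
            slice_length_eq sequence i (i + 1) hi.1 (by omega) (by omega)]
          omega]
        simp
      rw [show ((i + 1) + 1) = i + 2 by ring]
      rw [h1, List.nil_append]
      rw [List.filter_eq_self.mpr (by
        intro j hj
        rw [PySem.List.mem_pyRange_one] at hj
        rw [decide_eq_true_eq, PySem.List.len_eq,
          slice_length_eq sequence i j hi.1 (by omega) (by omega)]
        omega)]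
      apply List.map_congr_left
      intro j hj
      rw [PySem.List.mem_pyRange_one] at hj
      rw [PySem.List.slice_toNat _ hi.1 (by omega)])]
  rw [PySem.List.foldl_append_eq_flatMap, List.nil_append, PySem.List.len_eq]

theorem portA_eq_pairAux (sequence : List Int) (h : ¬(sequence = [] ∨ 2000 < (PySem.List.len sequence))) :
    find_equal_sums_intervals sequence = pairAux (sumsOf sequence) := by
  simp only [find_equal_sums_intervals, if_neg h]
  rw [intervals_eq sequence, phase2]
  simp only [sumsOf, List.map_flatMap, List.map_map]
  rfl

-- ===== VERDICT (by name: the statement is the Claim_ definition above) =====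
theorem find_equal_sums_intervals_spec : Claim_equal_find_equal_sums_intervals := by
  intro sequence _ hpre
  obtain ⟨h1, h2⟩ := hpre
  have h : ¬(sequence = [] ∨ 2000 < (PySem.List.len sequence)) :=
    not_or.mpr ⟨h1, by rw [PySem.List.len_eq]; omega⟩
  show find_equal_sums_intervals sequence = find_equal_sums_intervals_alt sequence
  rw [portA_eq_pairAux sequence h, portB_eq_counts sequence h]
  exact pairAux_eq_counts _
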